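-- pv_equiv track=rewrite | github.com/piyushk246/Puf_Code | puf_design.py | row_decoder
-- ===== SOURCE A (Python) =====
-- def row_decoder(challenge_row):
--     c=len(challenge_row)-1
--     d=0
--     for i in range((len(challenge_row))):
--         r=challenge_row[i]%10
--         d=d+r*(2**c)
--         c-=1
--     return d
-- ===== SOURCE B (Python) =====
-- def row_decoder(challenge_row):
--     d = 0
--     for x in challenge_row:
--         d = 2 * d + x % 10
--     return d
-- ===== Notes on version B (the rewrite author's own statement) =====
-- stated objective: faster
-- what changed: Replaces the positional-weight sum (explicit countdown counter c and a fresh 2**c big-integer power computed every iteration) with Horner's method: a single accumulator doubled each step, no counter and no exponentiation.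
import Mathlib
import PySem

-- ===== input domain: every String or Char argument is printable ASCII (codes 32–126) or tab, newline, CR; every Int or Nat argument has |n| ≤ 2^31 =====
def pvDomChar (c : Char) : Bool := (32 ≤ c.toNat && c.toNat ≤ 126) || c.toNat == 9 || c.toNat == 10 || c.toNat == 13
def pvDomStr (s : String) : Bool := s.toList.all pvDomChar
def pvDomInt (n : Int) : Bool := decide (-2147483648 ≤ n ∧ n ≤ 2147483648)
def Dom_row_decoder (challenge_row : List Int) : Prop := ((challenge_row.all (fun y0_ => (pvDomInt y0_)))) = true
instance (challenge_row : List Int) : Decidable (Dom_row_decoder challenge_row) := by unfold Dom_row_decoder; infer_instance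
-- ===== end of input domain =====

-- ===== PORT A =====
-- c counts down from len-1; 2**c is ported as 2 ^ c.toNat, exact since c ≥ 0 on every executed iteration
def row_decoder (challenge_row : List Int) : Int :=
  ((PySem.List.pyRange 0 (PySem.List.len challenge_row) 1).foldl
    (fun (dc : Int × Int) i =>
      (dc.1 + PySem.Int.mod (PySem.List.pyGetD challenge_row i 0) 10 * 2 ^ dc.2.toNat, dc.2 - 1))
    (0, (PySem.List.len challenge_row) - 1)).1

-- ===== PORT B =====
-- Horner's method: one accumulator, doubled each step
def row_decoder_alt (challenge_row : List Int) : Int :=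
  challenge_row.foldl (fun d x => 2 * d + PySem.Int.mod x 10) 0

-- ===== PRECONDITION & SPEC =====
def Spec_row_decoder (challenge_row : List Int) (out : Int) : Prop := out = row_decoder_alt challenge_row
instance (challenge_row : List Int) (out : Int) : Decidable (Spec_row_decoder challenge_row out) := by unfold Spec_row_decoder; infer_instance

-- ===== CLAIM (what is proved, stated in full; the proofs are below) =====
def Claim_equal_row_decoder : Prop := ∀ (challenge_row : List Int), Dom_row_decoder challenge_row → Spec_row_decoder challenge_row (row_decoder challenge_row)

-- ===== LEMMAS AND PROOFS =====

-- ===== VERDICT (by name: the statement is the Claim_ definition above) =====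
-- Horner fold from an arbitrary start b equals b * 2^len plus the fold from 0
theorem horner_shift (xs : List Int) : ∀ (b : Int),
    xs.foldl (fun d x => 2 * d + PySem.Int.mod x 10) b
      = b * 2 ^ xs.length + xs.foldl (fun d x => 2 * d + PySem.Int.mod x 10) 0 := by
  induction xs with
  | nil => intro b; simp
  | cons x t ih =>
    intro b
    simp only [List.foldl_cons, List.length_cons]
    rw [ih (2 * b + PySem.Int.mod x 10), ih (2 * 0 + PySem.Int.mod x 10)]
    ring

-- A's pair-state fold (weighted sum with countdown counter) computes d plus the Horner value
theorem a_fold_eq (xs : List Int) : ∀ (d : Int),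
    (xs.foldl
      (fun (dc : Int × Int) x =>
        (dc.1 + PySem.Int.mod x 10 * 2 ^ dc.2.toNat, dc.2 - 1))
      (d, (xs.length : Int) - 1)).1
      = d + xs.foldl (fun d x => 2 * d + PySem.Int.mod x 10) 0 := by
  induction xs with
  | nil => intro d; simp
  | cons x t ih =>
    intro d
    simp only [List.foldl_cons, List.length_cons]
    push_cast
    rw [show ((t.length : Int) + 1 - 1) = (t.length : Int) from by ring]
    rw [ih (d + PySem.Int.mod x 10 * 2 ^ (t.length : Int).toNat)]
    rw [horner_shift t (0 + PySem.Int.mod x 10)]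
    simp [Int.toNat_natCast]
    ring

theorem row_decoder_spec : Claim_equal_row_decoder := by
  intro xs _
  unfold Spec_row_decoder row_decoder row_decoder_alt
  simp only [PySem.List.len_eq]
  rw [PySem.List.foldl_pyRange_zero_pyGetD' xs 0
    (fun dc x => (dc.1 + PySem.Int.mod x 10 * 2 ^ dc.2.toNat, dc.2 - 1))
    (0, (xs.length : Int) - 1)]
  rw [a_fold_eq xs 0]
  ring
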